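-- pv_equiv track=rewrite | github.com/neumannjan/nn-structural-graph-vectorizer-compiler | lib/vectorize/pipeline/utils/ref_groups.py | get_unique_ref_groups_with_map
-- ===== SOURCE A (Python) =====
-- from typing import Hashable, Iterable, Literal, OrderedDict, Protocol, Sequence, TypeVar, overload
--
-- _THashable = TypeVar("_THashable", bound=Hashable)
--
-- def get_unique_ref_groups(ref_groups: list[tuple[_THashable, ...]]) -> list[tuple[_THashable, ...]]:
--     # out = sorted(set(ref_groups))
--     out = sorted(OrderedDict.fromkeys(ref_groups))
--     return out
--
-- def get_unique_ref_groups_with_map(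
--     ref_groups: list[tuple[_THashable, ...]],
-- ) -> tuple[list[tuple[_THashable, ...]], dict[int, int]]:
--     ref_groups_uniq = get_unique_ref_groups(ref_groups)
--     group_ord_map = {group_ref: o_group_new for o_group_new, group_ref in enumerate(ref_groups_uniq)}
--     ord_map = {}
--
--     for o_group, group_ref in enumerate(ref_groups):
--         o_group_new = group_ord_map[group_ref]
--         ord_map[o_group] = o_group_new
--
--     return ref_groups_uniq, ord_map
-- ===== SOURCE B (Python) =====
-- def get_unique_ref_groups_with_map(ref_groups):
--     pairs = sorted(enumerate(ref_groups), key=lambda p: p[1])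
--     rank = [0] * len(ref_groups)
--     uniq = []
--     for i, g in pairs:
--         if not uniq or uniq[-1] != g:
--             uniq.append(g)
--         rank[i] = len(uniq) - 1
--     return uniq, {i: r for i, r in enumerate(rank)}
-- ===== Notes on version B (the rewrite author's own statement) =====
-- stated objective: alternative
-- what changed: B sorts (index, group) pairs once and assigns ranks in a single run-length sweep over the sorted pairs, instead of A's sort-the-deduped-set, build a group-to-rank dict, then a second lookup pass over ref_groups.
import Mathlib
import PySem

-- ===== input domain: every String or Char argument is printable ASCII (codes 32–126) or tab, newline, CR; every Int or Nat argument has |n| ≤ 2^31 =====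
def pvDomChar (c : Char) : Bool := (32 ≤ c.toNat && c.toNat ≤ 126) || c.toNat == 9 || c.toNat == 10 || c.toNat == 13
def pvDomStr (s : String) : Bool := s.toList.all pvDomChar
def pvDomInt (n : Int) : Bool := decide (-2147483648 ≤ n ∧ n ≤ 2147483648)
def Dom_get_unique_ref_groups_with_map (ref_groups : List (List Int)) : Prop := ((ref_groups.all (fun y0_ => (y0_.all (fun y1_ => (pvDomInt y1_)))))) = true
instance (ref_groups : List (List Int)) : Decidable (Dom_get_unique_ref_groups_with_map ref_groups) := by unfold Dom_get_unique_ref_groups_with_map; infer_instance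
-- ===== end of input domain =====

-- B replaces A's "sort the deduped set, build a value→rank dict, then a second lookup pass" by one
-- stable sort of (index, group) pairs followed by a single run-length sweep assigning ranks; objective: alternative.

-- ===== PORT A =====
-- sorted(OrderedDict.fromkeys(ref_groups))
def get_unique_ref_groups (ref_groups : List (List Int)) : List (List Int) :=
  PySem.List.sorted (PySem.List.dedup ref_groups) (fun g => g) false

def get_unique_ref_groups_with_map (ref_groups : List (List Int)) : List (List Int) × (List (Int × Int)) :=
  let ref_groups_uniq := get_unique_ref_groups ref_groups
  -- {group_ref: o_group_new for o_group_new, group_ref in enumerate(ref_groups_uniq)}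
  let group_ord_map : PySem.Dict (List Int) Int :=
    (PySem.List.enumerate ref_groups_uniq 0).foldl (fun d p => d.insert p.2 p.1) PySem.Dict.empty
  -- for o_group, group_ref in enumerate(ref_groups): ord_map[o_group] = group_ord_map[group_ref]
  -- group_ord_map[group_ref] never raises KeyError (every group of ref_groups is in ref_groups_uniq), so getD is exact
  let ord_map : PySem.Dict Int Int :=
    (PySem.List.enumerate ref_groups 0).foldl (fun d p => d.insert p.1 (group_ord_map.getD p.2 0)) PySem.Dict.empty
  (ref_groups_uniq, ord_map.items)

-- ===== PORT B =====
-- loop body: if not uniq or uniq[-1] != g: uniq.append(g);  rank[i] = len(uniq) - 1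
def bStep (st : List (List Int) × List Int) (p : Int × List Int) : List (List Int) × List Int :=
  let uniq' := if st.1 = [] ∨ PySem.List.pyGetD st.1 (-1) [] ≠ p.2 then st.1 ++ [p.2] else st.1
  (uniq', PySem.List.pySetD st.2 p.1 ((uniq'.length : Int) - 1))

def get_unique_ref_groups_with_map_alt (ref_groups : List (List Int)) : List (List Int) × (List (Int × Int)) :=
  let pairs := PySem.List.sorted (PySem.List.enumerate ref_groups 0) (fun p => p.2) false
  let rank0 := PySem.List.pyRepeat [(0 : Int)] (ref_groups.length : Int)
  let res := pairs.foldl bStep ([], rank0)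
  -- {i: r for i, r in enumerate(rank)}
  let ord_map : PySem.Dict Int Int :=
    (PySem.List.enumerate res.2 0).foldl (fun d p => d.insert p.1 p.2) PySem.Dict.empty
  (res.1, ord_map.items)

-- ===== PRECONDITION & SPEC =====
def Spec_get_unique_ref_groups_with_map (ref_groups : List (List Int)) (out : List (List Int) × (List (Int × Int))) : Prop := out = get_unique_ref_groups_with_map_alt ref_groups
instance (ref_groups : List (List Int)) (out : List (List Int) × (List (Int × Int))) : Decidable (Spec_get_unique_ref_groups_with_map ref_groups out) := by unfold Spec_get_unique_ref_groups_with_map; infer_instance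

-- ===== CLAIM (what is proved, stated in full; the proofs are below) =====
def Claim_equal_get_unique_ref_groups_with_map : Prop := ∀ (ref_groups : List (List Int)), Dom_get_unique_ref_groups_with_map ref_groups → Spec_get_unique_ref_groups_with_map ref_groups (get_unique_ref_groups_with_map ref_groups)

-- ===== LEMMAS AND PROOFS =====

-- the LT/DecidableLT instances elaboration picks for `sorted` with a `List Int` key are the LinearOrder ones
theorem sorted_instList (α : Type) (xs : List α) (key : α → List Int) (r : Bool) :
    @PySem.List.sorted α (List Int) List.instLT (fun a b => a.decidableLT b) xs key r
      = @PySem.List.sorted α (List Int) List.instLinearOrder.toLT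
          (fun a b => LinearOrder.toDecidableLT _ _) xs key r := by
  congr 1

-- the uniq component of B's sweep, as a fold of its own
def sweepU (pairs : List (Int × List Int)) (u : List (List Int)) : List (List Int) :=
  pairs.foldl (fun u p => if u = [] ∨ PySem.List.pyGetD u (-1) [] ≠ p.2 then u ++ [p.2] else u) u

theorem fst_foldl_bStep (pairs : List (Int × List Int)) (u : List (List Int)) (r : List Int) :
    (pairs.foldl bStep (u, r)).1 = sweepU pairs u := by
  induction pairs generalizing u r with
  | nil => rfl
  | cons p ps ih => simp only [List.foldl_cons, bStep, sweepU] at *; split <;> simp_all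

theorem sweepU_prefix (pairs : List (Int × List Int)) (u : List (List Int)) :
    u <+: sweepU pairs u := by
  induction pairs generalizing u with
  | nil => exact List.prefix_refl u
  | cons p ps ih =>
    simp only [sweepU, List.foldl_cons] at *
    split
    · exact List.IsPrefix.trans (List.prefix_append u [p.2]) (ih _)
    · exact ih u

theorem last_max_of_pairwise_lt (w : List (List Int)) (g x : List Int)
    (h : (w ++ [g]).Pairwise (· < ·)) (hx : x ∈ w ++ [g]) : x ≤ g := by
  rw [List.pairwise_append] at h
  rcases List.mem_append.1 hx with hw | hg
  · exact le_of_lt (h.2.2 x hw g (by simp))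
  · simp at hg; simp [hg]

theorem sweepU_spec (pairs : List (Int × List Int)) (u : List (List Int))
    (h1 : u.Pairwise (· < ·))
    (h2 : pairs.Pairwise (fun p q => p.2 ≤ q.2))
    (h3 : ∀ p ∈ pairs, ∀ x ∈ u, x ≤ p.2) :
    (sweepU pairs u).Pairwise (· < ·) ∧
      (∀ x, x ∈ sweepU pairs u ↔ x ∈ u ∨ x ∈ pairs.map (·.2)) := by
  induction pairs generalizing u with
  | nil => simpa [sweepU] using h1
  | cons p ps ih =>
    rw [List.pairwise_cons] at h2
    simp only [sweepU, List.foldl_cons] at *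
    split
    · rename_i hcond
      have hlt : ∀ x ∈ u, x < p.2 := by
        rcases u.eq_nil_or_concat' with rfl | ⟨w, g, rfl⟩
        · simp
        · rw [PySem.List.pyGetD_neg_one_append_singleton] at hcond
          intro x hx
          have hle := last_max_of_pairwise_lt w g x h1 hx
          have hgp : g ≤ p.2 := h3 p (by simp) g (by simp)
          rcases hcond with h | h
          · simp at h
          · rcases lt_or_eq_of_le hle with h' | rfl
            · exact lt_of_lt_of_le h' hgp
            · exact lt_of_le_of_ne hgp h
      have h1' : (u ++ [p.2]).Pairwise (· < ·) := by
        rw [List.pairwise_append]; exact ⟨h1, by simp, by simpa using hlt⟩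
      have h3' : ∀ q ∈ ps, ∀ x ∈ u ++ [p.2], x ≤ q.2 := by
        intro q hq x hx
        rcases List.mem_append.1 hx with hx | hx
        · exact le_trans (h3 p (by simp) x hx) (h2.1 q hq)
        · simp at hx; subst hx; exact h2.1 q hq
      have := ih (u ++ [p.2]) h1' h2.2 h3'
      refine ⟨this.1, fun x => ?_⟩
      rw [this.2 x]
      simp only [List.map_cons, List.mem_cons, List.mem_append]
      tauto
    · rename_i hcond
      push_neg at hcond
      have hp2 : p.2 ∈ u := by
        rcases u.eq_nil_or_concat' with rfl | ⟨w, g, rfl⟩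
        · exact absurd rfl hcond.1
        · rw [PySem.List.pyGetD_neg_one_append_singleton] at hcond
          rw [hcond.2]; simp
      have h3' : ∀ q ∈ ps, ∀ x ∈ u, x ≤ q.2 := fun q hq x hx =>
        le_trans (h3 p (by simp) x hx) (h2.1 q hq)
      have := ih u h1 h2.2 h3'
      refine ⟨this.1, fun x => ?_⟩
      rw [this.2 x]
      simp only [List.map_cons, List.mem_cons]
      constructor
      · tauto
      · rintro (h | h | h)
        · exact Or.inl h
        · subst h; exact Or.inl hp2
        · exact Or.inr h

theorem idxOf_append_cons_self (w t : List (List Int)) (g : List Int) (h : g ∉ w) :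
    (w ++ g :: t).idxOf g = w.length := by
  induction w with
  | nil => simp [List.idxOf_cons_self]
  | cons a w ih =>
    have ha : a ≠ g := by intro hh; exact h (by simp [hh])
    simp only [List.cons_append, List.idxOf_cons_ne _ ha, List.length_cons]
    rw [ih (by intro hh; exact h (by simp [hh]))]

theorem snd_foldl_bStep (pairs : List (Int × List Int)) (u : List (List Int)) (r : List Int)
    (h1 : u.Pairwise (· < ·))
    (h2 : pairs.Pairwise (fun p q => p.2 ≤ q.2))
    (h3 : ∀ p ∈ pairs, ∀ x ∈ u, x ≤ p.2) :
    (pairs.foldl bStep (u, r)).2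
      = pairs.foldl (fun r p => PySem.List.pySetD r p.1 ((List.idxOf p.2 (sweepU pairs u) : Int))) r := by
  induction pairs generalizing u r with
  | nil => rfl
  | cons p ps ih =>
    rw [List.pairwise_cons] at h2
    simp only [List.foldl_cons, bStep]
    split
    · rename_i hcond
      have hlt : ∀ x ∈ u, x < p.2 := by
        rcases u.eq_nil_or_concat' with rfl | ⟨w, g, rfl⟩
        · simp
        · rw [PySem.List.pyGetD_neg_one_append_singleton] at hcond
          intro x hx
          have hle := last_max_of_pairwise_lt w g x h1 hx
          have hgp : g ≤ p.2 := h3 p (by simp) g (by simp)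
          rcases hcond with h | h
          · simp at h
          · rcases lt_or_eq_of_le hle with h' | rfl
            · exact lt_of_lt_of_le h' hgp
            · exact lt_of_le_of_ne hgp h
      have h1' : (u ++ [p.2]).Pairwise (· < ·) := by
        rw [List.pairwise_append]; exact ⟨h1, by simp, by simpa using hlt⟩
      have h3' : ∀ q ∈ ps, ∀ x ∈ u ++ [p.2], x ≤ q.2 := by
        intro q hq x hx
        rcases List.mem_append.1 hx with hx | hx
        · exact le_trans (h3 p (by simp) x hx) (h2.1 q hq)
        · simp at hx; subst hx; exact h2.1 q hq
      rw [ih (u ++ [p.2]) _ h1' h2.2 h3']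
      have hU : sweepU (p :: ps) u = sweepU ps (u ++ [p.2]) := by
        simp only [sweepU, List.foldl_cons]; rw [if_pos hcond]
      rw [hU]
      congr 1
      -- stored value: |u|+1-1 = idxOf p.2 (sweepU ps (u ++ [p.2]))
      obtain ⟨t, ht⟩ := sweepU_prefix ps (u ++ [p.2])
      rw [← ht]
      have : (u ++ [p.2]) ++ t = u ++ p.2 :: t := by simp
      rw [this, idxOf_append_cons_self u t p.2 (fun hm => lt_irrefl _ (hlt _ hm))]
      simp
    · rename_i hcond
      push_neg at hcond
      obtain ⟨w, g, rfl⟩ : ∃ w g, u = w ++ [g] := by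
        rcases u.eq_nil_or_concat' with rfl | ⟨w, g, rfl⟩
        · exact absurd rfl hcond.1
        · exact ⟨w, g, rfl⟩
      rw [PySem.List.pyGetD_neg_one_append_singleton] at hcond
      have h3' : ∀ q ∈ ps, ∀ x ∈ w ++ [g], x ≤ q.2 := fun q hq x hx =>
        le_trans (h3 p (by simp) x hx) (h2.1 q hq)
      rw [ih (w ++ [g]) _ h1 h2.2 h3']
      have hU : sweepU (p :: ps) (w ++ [g]) = sweepU ps (w ++ [g]) := by
        simp only [sweepU, List.foldl_cons]
        rw [if_neg]; push_neg
        exact ⟨hcond.1, by rw [PySem.List.pyGetD_neg_one_append_singleton]; exact hcond.2⟩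
      rw [hU]
      congr 1
      obtain ⟨t, ht⟩ := sweepU_prefix ps (w ++ [g])
      rw [← ht, ← hcond.2]
      have : (w ++ [g]) ++ t = w ++ g :: t := by simp
      rw [this, idxOf_append_cons_self w t g ?_]
      · simp
      · rw [List.pairwise_append] at h1
        intro hm; exact lt_irrefl _ (h1.2.2 g hm g (by simp))

-- evaluating the pySetD fold: every write at index p.1 stores f p.1
theorem foldl_pySetD_getD (pairs : List (Int × List Int)) (r : List Int)
    (g : Int × List Int → Int) (f : Int → Int)
    (hb : ∀ p ∈ pairs, 0 ≤ p.1 ∧ p.1 < (r.length : Int) ∧ g p = f p.1) (j : Nat) :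
    (pairs.foldl (fun r p => PySem.List.pySetD r p.1 (g p)) r).getD j 0
      = if (j : Int) ∈ pairs.map (·.1) then f j else r.getD j 0 := by
  induction pairs generalizing r with
  | nil => simp
  | cons p ps ih =>
    obtain ⟨hp0, hplen, hpg⟩ := hb p (by simp)
    have hlen : (PySem.List.pySetD r p.1 (g p)).length = r.length :=
      PySem.List.length_pySetD r p.1 (g p)
    rw [List.foldl_cons, ih _ (fun q hq => by rw [hlen]; exact hb q (by simp [hq]))]
    by_cases hj : (j : Int) ∈ ps.map (·.1)
    · simp [hj]
    · by_cases hje : (j : Int) = p.1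
      · have hcond : (j : Int) ∈ (p :: ps).map (·.1) := by simp [hje]
        rw [if_neg hj, if_pos hcond, PySem.List.pySetD_of_nonneg r (g p) hp0]
        have hji : p.1.toNat = j := by omega
        rw [← hji, List.getD_eq_getElem _ _ (by simp; omega)]
        rw [List.getElem_set_self, hpg]
        congr 1
        omega
      · have hne : p.1.toNat ≠ j := by omega
        rw [PySem.List.pySetD_of_nonneg r (g p) hp0]
        simp [hj, hje, List.getElem?_set_ne hne]

theorem length_foldl_pySetD (pairs : List (Int × List Int)) (r : List Int)
    (g : Int × List Int → Int) :
    (pairs.foldl (fun r p => PySem.List.pySetD r p.1 (g p)) r).length = r.length := by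
  induction pairs generalizing r with
  | nil => rfl
  | cons p ps ih => rw [List.foldl_cons, ih, PySem.List.length_pySetD]

-- a dict built by inserting strictly increasing fresh Int keys lists its items in insertion order
theorem items_foldl_insert_enumerate {α : Type} (xs : List α) (f : Int × α → Int) :
    ∀ (s : Int) (d : PySem.Dict Int Int), (∀ k ∈ d.keys, k < s) →
    ((PySem.List.enumerate xs s).foldl (fun d p => d.insert p.1 (f p)) d).items
      = d.items ++ (PySem.List.enumerate xs s).map (fun p => (p.1, f p)) := by
  induction xs with
  | nil => intro s d _; simp [PySem.List.enumerate_nil]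
  | cons x xs ih =>
    intro s d hk
    rw [PySem.List.enumerate_cons]
    simp only [List.foldl_cons, List.map_cons]
    have hnc : d.contains s = false := by
      rcases h : d.contains s with _ | _
      · rfl
      · exact absurd (lt_irrefl s) (by simpa using (hk s ((PySem.Dict.contains_iff_mem_keys d s).1 h)))
    rw [ih (s + 1) (d.insert s (f (s, x))) ?_]
    · rw [PySem.Dict.items_insert_of_not_contains d _ hnc]; simp
    · intro k hkm
      rw [PySem.Dict.keys_insert_of_not_contains d _ hnc] at hkm
      rcases List.mem_append.1 hkm with h | h
      · exact lt_trans (hk k h) (by omega)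
      · simp at h; omega

-- the group→rank dict of A answers idxOf into uniq
theorem getD_group_ord_map (uniq : List (List Int)) (hnd : uniq.Nodup) :
    ∀ (s : Int) (d : PySem.Dict (List Int) Int) (gr : List Int),
    ((PySem.List.enumerate uniq s).foldl (fun d p => d.insert p.2 p.1) d).getD gr 0
      = if gr ∈ uniq then s + (uniq.idxOf gr : Int) else d.getD gr 0 := by
  induction uniq with
  | nil => intro s d gr; simp [PySem.List.enumerate_nil]
  | cons x xs ih =>
    intro s d gr
    rw [List.nodup_cons] at hnd
    rw [PySem.List.enumerate_cons]
    simp only [List.foldl_cons]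
    rw [ih hnd.2 (s + 1) _ gr]
    by_cases hgr : gr = x
    · subst hgr
      simp [hnd.1, PySem.Dict.getD_insert_self, List.idxOf_cons_self]
    · by_cases hmem : gr ∈ xs
      · simp [hmem, hgr, List.idxOf_cons_ne _ (Ne.symm hgr)]
        push_cast
        omega
      · simp [hmem, hgr, PySem.Dict.getD_insert_of_ne _ _ _ hgr]

-- the two uniq lists coincide
theorem uniq_eq (rg : List (List Int)) :
    get_unique_ref_groups rg
      = (((PySem.List.sorted (PySem.List.enumerate rg 0) (fun p => p.2) false)).foldl bStep
          ([], PySem.List.pyRepeat [(0 : Int)] (rg.length : Int))).1 := by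
  set pairs := PySem.List.sorted (PySem.List.enumerate rg 0) (fun p => p.2) false with hpairs
  have h2 : pairs.Pairwise (fun p q => p.2 ≤ q.2) := by
    rw [hpairs, sorted_instList]; exact PySem.List.sorted_pairwise _ _
  rw [fst_foldl_bStep]
  obtain ⟨hpw, hmem⟩ := sweepU_spec pairs [] (by simp) h2 (by simp)
  have hperm : pairs.Perm (PySem.List.enumerate rg 0) := by
    rw [hpairs]; exact PySem.List.sorted_perm _ _ _
  have hsnd : ∀ y, y ∈ pairs.map (·.2) ↔ y ∈ rg := by
    intro y
    rw [List.Perm.mem_iff (List.Perm.map (·.2) hperm)]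
    rw [PySem.List.map_snd_enumerate]
  have hU : ∀ y, y ∈ sweepU pairs [] ↔ y ∈ PySem.List.dedup rg := by
    intro y; rw [hmem y, PySem.List.mem_dedup]; simp [hsnd y]
  have hnodupU : (sweepU pairs []).Nodup := hpw.imp (fun h => ne_of_lt h)
  have hperm2 : (sweepU pairs []).Perm (PySem.List.dedup rg) :=
    (List.perm_ext_iff_of_nodup hnodupU (PySem.List.nodup_dedup rg)).2 hU
  unfold get_unique_ref_groups
  rw [sorted_instList]
  exact PySem.List.sorted_eq_of_perm_of_pairwise_lt _ _ _ hperm2 hpw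

theorem main_lemma (rg : List (List Int)) :
    get_unique_ref_groups_with_map rg = get_unique_ref_groups_with_map_alt rg := by
  simp only [get_unique_ref_groups_with_map, get_unique_ref_groups_with_map_alt]
  set U := get_unique_ref_groups rg with hUdef
  set pairs := PySem.List.sorted (PySem.List.enumerate rg 0) (fun p => p.2) false with hpairs
  set r0 := PySem.List.pyRepeat [(0 : Int)] ((rg.length : Int)) with hr0
  have h2 : pairs.Pairwise (fun p q => p.2 ≤ q.2) := by
    rw [hpairs, sorted_instList]; exact PySem.List.sorted_pairwise _ _
  have hperm : pairs.Perm (PySem.List.enumerate rg 0) := by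
    rw [hpairs]; exact PySem.List.sorted_perm _ _ _
  have hUeq : U = (pairs.foldl bStep ([], r0)).1 := uniq_eq rg
  have hUsweep : U = sweepU pairs [] := by rw [hUeq, fst_foldl_bStep]
  have hmemU : ∀ x, x ∈ U ↔ x ∈ rg := by
    intro x
    rw [hUsweep, (sweepU_spec pairs [] (by simp) h2 (by simp)).2 x]
    have : x ∈ pairs.map (·.2) ↔ x ∈ rg := by
      rw [List.Perm.mem_iff (List.Perm.map (·.2) hperm), PySem.List.map_snd_enumerate]
    simp [this]
  have hnodupU : U.Nodup := by
    have : U.Perm (PySem.List.dedup rg) := by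
      rw [hUdef]; unfold get_unique_ref_groups
      exact PySem.List.sorted_perm _ _ _
    exact this.symm.nodup (PySem.List.nodup_dedup rg)
  have hr0len : r0.length = rg.length := by
    rw [hr0, PySem.List.pyRepeat_singleton]; simp
  -- A's ord_map items
  have hAitems : ((PySem.List.enumerate rg 0).foldl
        (fun d p => d.insert p.1
          (((PySem.List.enumerate U 0).foldl (fun d p => d.insert p.2 p.1) PySem.Dict.empty).getD p.2 0))
        PySem.Dict.empty).items
      = (PySem.List.enumerate rg 0).map (fun p => (p.1, (U.idxOf p.2 : Int))) := by
    rw [items_foldl_insert_enumerate rg _ 0 PySem.Dict.empty (by simp [PySem.Dict.keys_empty])]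
    rw [show (PySem.Dict.empty : PySem.Dict Int Int).items = [] from rfl, List.nil_append]
    refine List.map_congr_left ?_
    intro p hp
    obtain ⟨k, hk, rfl⟩ := (PySem.List.mem_enumerate_iff rg 0 p).1 hp
    have hmem : rg[k] ∈ U := (hmemU _).2 (by exact List.getElem_mem hk)
    rw [getD_group_ord_map U hnodupU 0 PySem.Dict.empty]
    simp [hmem]
  -- B's rank list
  set R := (pairs.foldl bStep ([], r0)).2 with hR
  have hRfold : R = pairs.foldl
      (fun r p => PySem.List.pySetD r p.1 ((List.idxOf p.2 U : Int))) r0 := by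
    rw [hR, snd_foldl_bStep pairs [] r0 (by simp) h2 (by simp), hUsweep]
  have hb : ∀ p ∈ pairs, 0 ≤ p.1 ∧ p.1 < (r0.length : Int) ∧
      ((List.idxOf p.2 U : Int)) = (fun j => ((List.idxOf (PySem.List.pyGetD rg j []) U : Int))) p.1 := by
    intro p hp
    obtain ⟨k, hk, rfl⟩ := (PySem.List.mem_enumerate_iff rg 0 p).1 (hperm.subset hp)
    refine ⟨by omega, by rw [hr0len]; omega, ?_⟩
    have : PySem.List.pyGetD rg ((0 : Int) + (k : Int)) [] = rg[k] := by
      rw [zero_add, PySem.List.pyGetD_natCast, List.getD_eq_getElem rg [] hk]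
    simp only [this]
  have hRlen : R.length = rg.length := by
    rw [hRfold, length_foldl_pySetD, hr0len]
  have hRget : ∀ (k : Nat) (hk : k < rg.length), R.getD k 0 = (List.idxOf (rg[k]'hk) U : Int) := by
    intro k hk
    rw [hRfold, foldl_pySetD_getD pairs r0 (fun p => (List.idxOf p.2 U : Int)) (fun j => (List.idxOf (PySem.List.pyGetD rg j []) U : Int)) hb k]
    have hkmem : (k : Int) ∈ pairs.map (·.1) := by
      rw [List.Perm.mem_iff (List.Perm.map (·.1) hperm), PySem.List.map_fst_enumerate]
      rw [PySem.List.mem_pyRange_one]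
      constructor
      · omega
      · omega
    rw [if_pos hkmem]
    have : PySem.List.pyGetD rg ((k : Nat) : Int) [] = rg[k] := by
      rw [PySem.List.pyGetD_natCast, List.getD_eq_getElem rg [] hk]
    simp only [this]
  -- B's ord_map items are just enumerate R
  have hBitems : ((PySem.List.enumerate R 0).foldl (fun d p => d.insert p.1 p.2) PySem.Dict.empty).items
      = PySem.List.enumerate R 0 := by
    rw [items_foldl_insert_enumerate R _ 0 PySem.Dict.empty (by simp [PySem.Dict.keys_empty])]
    rw [show (PySem.Dict.empty : PySem.Dict Int Int).items = [] from rfl, List.nil_append]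
    simp
  refine Prod.ext hUeq ?_
  simp only [hAitems, hBitems]
  refine List.ext_getElem ?_ ?_
  · simp [PySem.List.length_enumerate, hRlen]
  · intro k h1k h2k
    have hk : k < rg.length := by simpa [PySem.List.length_enumerate] using h1k
    have hkR : k < R.length := by omega
    rw [List.getElem_map, PySem.List.getElem_enumerate rg 0 k (by simpa [PySem.List.length_enumerate] using hk),
        PySem.List.getElem_enumerate R 0 k (by simpa [PySem.List.length_enumerate] using hkR)]
    have : R[k] = R.getD k 0 := (List.getD_eq_getElem R 0 hkR).symm
    rw [this, hRget k hk]

-- ===== VERDICT (by name: the statement is the Claim_ definition above) =====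
theorem get_unique_ref_groups_with_map_spec : Claim_equal_get_unique_ref_groups_with_map := by
  intro rg _
  unfold Spec_get_unique_ref_groups_with_map
  exact main_lemma rg
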